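-- pv_equiv track=rewrite | github.com/ebbekarlstad/computer-security | cipher_project/hashing/hash_menu.py | avalanche_test
-- ===== SOURCE A (Python) =====
-- def hash_function(input_string):
--     # Calculate the sum of ASCII values
--     # of all the characters in the input string
--     ascii_sum = sum(ord(char) for char in input_string)
--     # Use modulo operation to confine the range of the hash to 0-255 (8 bits)
--     return ascii_sum % 256
--
-- def bit_difference(hash1, hash2):
--     # XOR the two hashes to determine which bits are different
--     xor_result = hash1 ^ hash2
--     # Count and return the number of bits that are set to 1 in the XOR result
--     return bin(xor_result).count("1")
--
-- def avalanche_test(words):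
--     previous_hash = None
--     differences = []
--
--     for word in words:
--         # Compute the hash value of the current word
--         current_hash = hash_function(word)
--         # If it's not the first word, calculate the bit
--         # difference from the previous hash
--         if previous_hash is not None:
--             difference = bit_difference(previous_hash, current_hash)
--             differences.append(difference)  # Add the difference to the list
--         # Update previous_hash for the next iteration
--         previous_hash = current_hash
--
--     return differences
-- ===== SOURCE B (Python) =====
-- # Popcount lookup table built once by dynamic programming: popcount(i) = popcount(i >> 1) + (i & 1)
-- _POP = [0]
-- for _i in range(1, 256):
--     _POP.append(_POP[_i >> 1] + (_i & 1))
--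
--
-- def avalanche_test(words):
--     n = len(words)
--     if n < 2:
--         return []
--     if n == 2:
--         h1 = sum(map(ord, words[0])) % 256
--         h2 = sum(map(ord, words[1])) % 256
--         return [_POP[h1 ^ h2]]
--     mid = n // 2
--     # split with one overlapping word so every adjacent pair lands in exactly one half
--     return avalanche_test(words[:mid + 1]) + avalanche_test(words[mid:])
-- ===== Notes on version B (the rewrite author's own statement) =====
-- stated objective: alternative
-- what changed: Replaced the single stateful previous_hash loop and bin().count('1') with overlap-splitting divide-and-conquer (each half shares one boundary word) and a 256-entry popcount table built once by dynamic programming.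
import Mathlib
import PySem

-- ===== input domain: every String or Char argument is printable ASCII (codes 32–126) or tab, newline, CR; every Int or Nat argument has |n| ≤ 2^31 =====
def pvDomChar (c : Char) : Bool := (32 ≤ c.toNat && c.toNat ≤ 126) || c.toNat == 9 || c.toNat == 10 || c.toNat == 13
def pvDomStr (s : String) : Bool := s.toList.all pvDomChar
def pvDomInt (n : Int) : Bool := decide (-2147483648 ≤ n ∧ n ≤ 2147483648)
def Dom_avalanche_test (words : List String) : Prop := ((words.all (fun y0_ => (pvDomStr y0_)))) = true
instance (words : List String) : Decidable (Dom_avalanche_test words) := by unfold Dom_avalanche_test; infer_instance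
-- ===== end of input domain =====

-- B replaces A's single stateful previous_hash loop with overlap-splitting divide and conquer plus a
-- DP popcount lookup table instead of bin().count("1") (objective: alternative; not claimed faster).

-- ===== PORT A =====
-- helper hash_function: sum of character codes, Python % 256
def pvHash (s : String) : Int :=
  PySem.Int.mod ((s.toList.map (fun c => (c.toNat : Int))).foldl (· + ·) 0) 256

-- helper bit_difference: bin(hash1 ^ hash2).count("1")
def pvBitDiff (h1 h2 : Int) : Int :=
  (PySem.Str.count (PySem.Int.pyBin (PySem.Int.bxor h1 h2)) "1" : Int)

def avalanche_test (words : List String) : List Int :=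
  (words.foldl
    (fun (st : Option Int × List Int) word =>
      let current_hash := pvHash word
      let differences :=
        match st.1 with
        | some previous_hash => st.2 ++ [pvBitDiff previous_hash current_hash]
        | none => st.2
      (some current_hash, differences))
    (none, [])).2

-- ===== PORT B =====
-- module-level table _POP: _POP[i] = _POP[i >> 1] + (i & 1), built over range(1, 256)
def pvPopTable : List Int :=
  (PySem.List.pyRange 1 256 1).foldl
    (fun (acc : List Int) (i : Int) =>
      acc ++ [PySem.List.pyGetD acc (i >>> (1 : Nat)) 0 + PySem.Int.band i 1]) [0]

-- sum(map(ord, w)) % 256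
def pvHashB (s : String) : Int :=
  PySem.Int.mod (s.toList.map (fun c => (c.toNat : Int))).sum 256

-- words[:mid+1] / words[mid:] are slices with nonnegative bounds: exactly List.take / List.drop
-- (PySem.List.slice_to_natCast / slice_from_natCast); len(words) ≥ 0, so n // 2 is Nat division.
def avalanche_test_alt (words : List String) : List Int :=
  if words.length < 2 then []
  else if words.length = 2 then
    let h1 := pvHashB (PySem.List.pyGetD words 0 "")
    let h2 := pvHashB (PySem.List.pyGetD words 1 "")
    [PySem.List.pyGetD pvPopTable (PySem.Int.bxor h1 h2) 0]
  else
    avalanche_test_alt (words.take (words.length / 2 + 1)) ++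
      avalanche_test_alt (words.drop (words.length / 2))
termination_by words.length
decreasing_by
  · simp only [List.length_take]; omega
  · simp only [List.length_drop]; omega

-- ===== PRECONDITION & SPEC =====
def Spec_avalanche_test (words : List String) (out : List Int) : Prop := out = avalanche_test_alt words
instance (words : List String) (out : List Int) : Decidable (Spec_avalanche_test words out) := by unfold Spec_avalanche_test; infer_instance

-- ===== CLAIM (what is proved, stated in full; the proofs are below) =====
def Claim_equal_avalanche_test : Prop := ∀ (words : List String), Dom_avalanche_test words → Spec_avalanche_test words (avalanche_test words)

-- ===== LEMMAS AND PROOFS =====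

-- adjacent-pair reference form both ports are reduced to
def pvP : List String → List Int
  | w1 :: w2 :: rest => pvBitDiff (pvHash w1) (pvHash w2) :: pvP (w2 :: rest)
  | _ => []

-- A's loop, state threaded with a known previous hash
def pvQ (p : Int) : List String → List Int
  | [] => []
  | w :: t => pvBitDiff p (pvHash w) :: pvQ (pvHash w) t

theorem pvHash_nonneg (s : String) : 0 ≤ pvHash s :=
  PySem.Int.mod_nonneg _ (by norm_num)

theorem pvHash_lt (s : String) : pvHash s < 256 :=
  PySem.Int.mod_lt _ (by norm_num)

theorem pvHashB_eq (s : String) : pvHashB s = pvHash s := by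
  simp [pvHashB, pvHash, List.sum_eq_foldl]

set_option maxRecDepth 8192 in
theorem pvPopTable_spec : ∀ n : Nat, n < 256 →
    PySem.List.pyGetD pvPopTable ((n : Int)) 0
      = (PySem.Str.count (PySem.Int.pyBin (n : Int)) "1" : Int) := by decide

theorem pvLookup_eq (h1 h2 : Int) (a1 : 0 ≤ h1) (b1 : h1 < 256) (a2 : 0 ≤ h2) (b2 : h2 < 256) :
    PySem.List.pyGetD pvPopTable (PySem.Int.bxor h1 h2) 0 = pvBitDiff h1 h2 := by
  obtain ⟨m, rfl⟩ := Int.eq_ofNat_of_zero_le a1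
  obtain ⟨k, rfl⟩ := Int.eq_ofNat_of_zero_le a2
  have hm : m < 256 := by exact_mod_cast b1
  have hk : k < 256 := by exact_mod_cast b2
  have hx : m ^^^ k < 256 := Nat.xor_lt_two_pow (n := 8) hm hk
  rw [pvBitDiff, PySem.Int.bxor_natCast]
  exact pvPopTable_spec _ hx

theorem pvQ_loop (words : List String) (p : Int) (acc : List Int) :
    (words.foldl
      (fun (st : Option Int × List Int) word =>
        let current_hash := pvHash word
        let differences :=
          match st.1 with
          | some previous_hash => st.2 ++ [pvBitDiff previous_hash current_hash]
          | none => st.2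
        (some current_hash, differences))
      (some p, acc)).2 = acc ++ pvQ p words := by
  induction words generalizing p acc with
  | nil => simp [pvQ]
  | cons w ws ih => simp [List.foldl, pvQ, ih]

theorem pvQ_eq_pvP (words : List String) (w : String) :
    pvQ (pvHash w) words = pvP (w :: words) := by
  induction words generalizing w with
  | nil => simp [pvQ, pvP]
  | cons v vs ih => simp [pvQ, pvP, ih]

theorem avalanche_eq_pvP (words : List String) : avalanche_test words = pvP words := by
  cases words with
  | nil => simp [avalanche_test, pvP]
  | cons w ws =>
      simp only [avalanche_test, List.foldl]
      rw [pvQ_loop, pvQ_eq_pvP]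
      simp

theorem pvP_split (l : List String) (m : Nat) (h1 : 1 ≤ m) (h2 : m + 1 ≤ l.length) :
    pvP (l.take (m + 1)) ++ pvP (l.drop m) = pvP l := by
  induction l generalizing m with
  | nil => simp at h2
  | cons a t ih =>
      match m, h1 with
      | 1, _ =>
          match t, h2 with
          | b :: t', _ => simp [pvP]
      | (k+2), _ =>
          have hlen : k + 2 ≤ t.length := by simpa using h2
          match t, hlen with
          | b :: t', hlen =>
              have := ih (m := k + 1) (by omega) (by simpa using hlen)
              simp only [List.take_succ_cons, List.drop_succ_cons, pvP] at *
              simpa using this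

theorem alt_eq_pvP (words : List String) : avalanche_test_alt words = pvP words := by
  fun_induction avalanche_test_alt words with
  | case1 words hlt =>
      match words, hlt with
      | [], _ => rfl
      | [w], _ => rfl
  | case2 words hlt heq =>
      obtain ⟨w1, w2, rfl⟩ := List.length_eq_two.mp heq
      have e0 : PySem.List.pyGetD [w1, w2] (0 : Int) "" = w1 := by simp [pysem]
      have e1 : PySem.List.pyGetD [w1, w2] (1 : Int) "" = w2 := by simp [pysem]
      show [PySem.List.pyGetD pvPopTable
              (PySem.Int.bxor (pvHashB (PySem.List.pyGetD [w1, w2] 0 ""))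
                (pvHashB (PySem.List.pyGetD [w1, w2] 1 ""))) 0] = pvP [w1, w2]
      simp only [e0, e1, pvHashB_eq, pvP,
        pvLookup_eq _ _ (pvHash_nonneg w1) (pvHash_lt w1) (pvHash_nonneg w2) (pvHash_lt w2)]
  | case3 words hlt heq ih1 ih2 =>
      rw [ih1, ih2]
      exact pvP_split words (words.length / 2) (by omega) (by omega)

-- ===== VERDICT (by name: the statement is the Claim_ definition above) =====
theorem avalanche_test_spec : Claim_equal_avalanche_test := by
  intro words _
  unfold Spec_avalanche_test
  rw [avalanche_eq_pvP, alt_eq_pvP]
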